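-- pv_equiv track=rewrite | github.com/LudoOliver/TechProject | OptTest.py | SpeakerNeighbour
-- ===== SOURCE A (Python) =====
-- import math
--
-- def Indice2Pos(x):
--     j = x%GridSize+1
--     i = math.floor(x/GridSize)+1
--     return i,j
--
-- def SpeakerNeighbour(indice):
--     NeighbourIndices= ([indice-GridSize-1,indice-GridSize,indice-GridSize+1,
--                        indice-1,indice+1,indice+GridSize-1,indice+GridSize,
--                        indice+GridSize+1])
--     i,j = Indice2Pos(indice)
--     if i not in [1,GridSize] and j not in [1,GridSize]:
--         return [NeighbourIndices[i] for i in [1,3,4,6]]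
--     if i ==1 and j not in [1,GridSize]:
--         return [NeighbourIndices[i] for i in [3,4,6]]
--     if i ==GridSize and j not in [1,GridSize]:
--         return [NeighbourIndices[i] for i in [1,3,4]]
--     if j ==1 and i not in [1,GridSize]:
--         return [NeighbourIndices[i] for i in
--                     [1,4,6]]
--     if j ==GridSize and i not in [1,GridSize]:
--         return [NeighbourIndices[i] for i in
--                 [1,3,6]]
--     if j ==GridSize and i == GridSize:
--         return [NeighbourIndices[i] for i in
--                 [1,3]]
--     if j ==GridSize and i== 1:
--         return [NeighbourIndices[i] for i in [3,6]]
--     if j ==1 and i ==1: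
--         return [NeighbourIndices[i] for i in
--                 [4,6]]
--     if j==1 and i ==GridSize:
--         return [NeighbourIndices[i] for i in
--                 [1,4]]
--
-- GridSize = 30
-- ===== SOURCE B (Python) =====
-- import math
--
-- GridSize = 30
--
-- def Indice2Pos(x):
--     j = x % GridSize + 1
--     i = math.floor(x / GridSize) + 1
--     return i, j
--
-- def SpeakerNeighbour(indice):
--     i, j = Indice2Pos(indice)
--     res = []
--     if i != 1:
--         res.append(indice - GridSize)
--     if j != 1:
--         res.append(indice - 1)
--     if j != GridSize:
--         res.append(indice + 1)
--     if i != GridSize: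
--         res.append(indice + GridSize)
--     return res
-- ===== Notes on version B (the rewrite author's own statement) =====
-- stated objective: simpler
-- what changed: B replaces A's fixed candidate array and long boundary-case cascade with four independent equality-guarded appends of the orthogonal neighbours in up/left/right/down order.
import Mathlib
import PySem

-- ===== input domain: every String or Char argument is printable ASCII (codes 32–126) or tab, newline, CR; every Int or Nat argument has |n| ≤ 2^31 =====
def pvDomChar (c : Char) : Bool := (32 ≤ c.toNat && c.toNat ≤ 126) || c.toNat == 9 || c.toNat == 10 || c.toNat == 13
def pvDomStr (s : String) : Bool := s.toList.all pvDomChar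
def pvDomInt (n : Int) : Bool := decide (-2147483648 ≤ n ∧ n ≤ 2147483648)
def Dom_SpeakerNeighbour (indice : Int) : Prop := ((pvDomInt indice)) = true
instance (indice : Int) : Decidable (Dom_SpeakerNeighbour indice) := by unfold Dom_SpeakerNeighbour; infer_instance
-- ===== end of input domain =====

-- B replaces A's fixed candidate array and long boundary-case cascade with four
-- independent equality-guarded appends of the orthogonal neighbours (simpler).

-- ===== PORT A =====
-- Indice2Pos: j = x % GridSize + 1; i = math.floor(x / GridSize) + 1.
-- On |x| ≤ 2^31 the float division x/30 is accurate enough that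
-- math.floor(x/30) equals Python's x // 30 exactly, so it is ported as floordiv.
def Indice2Pos (x : Int) : Int × Int :=
  let j := PySem.Int.mod x 30 + 1
  let i := PySem.Int.floordiv x 30 + 1
  (i, j)

def SpeakerNeighbour (indice : Int) : List Int :=
  let g : Int := 30
  -- the 8-element candidate list; elements are selected by literal in-range indices,
  -- transcribed as direct getD lookups (the default 0 is never used: indices 1..6 < 8)
  let n : List Int := [indice - g - 1, indice - g, indice - g + 1,
                       indice - 1, indice + 1, indice + g - 1, indice + g,
                       indice + g + 1]
  let p := Indice2Pos indice
  let i := p.1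
  let j := p.2
  if ¬(i = 1 ∨ i = g) ∧ ¬(j = 1 ∨ j = g) then [1, 3, 4, 6].map (fun k => n.getD k 0)
  else if i = 1 ∧ ¬(j = 1 ∨ j = g) then [3, 4, 6].map (fun k => n.getD k 0)
  else if i = g ∧ ¬(j = 1 ∨ j = g) then [1, 3, 4].map (fun k => n.getD k 0)
  else if j = 1 ∧ ¬(i = 1 ∨ i = g) then [1, 4, 6].map (fun k => n.getD k 0)
  else if j = g ∧ ¬(i = 1 ∨ i = g) then [1, 3, 6].map (fun k => n.getD k 0)
  else if j = g ∧ i = g then [1, 3].map (fun k => n.getD k 0)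
  else if j = g ∧ i = 1 then [3, 6].map (fun k => n.getD k 0)
  else if j = 1 ∧ i = 1 then [4, 6].map (fun k => n.getD k 0)
  else if j = 1 ∧ i = g then [1, 4].map (fun k => n.getD k 0)
  else []  -- Python's implicit None; unreachable since j = x % 30 + 1 ∈ [1,30] makes the branches exhaustive

-- ===== PORT B =====
def SpeakerNeighbour_alt (indice : Int) : List Int :=
  let g : Int := 30
  let p := Indice2Pos indice
  let i := p.1
  let j := p.2
  (if i ≠ 1 then [indice - g] else []) ++
  (if j ≠ 1 then [indice - 1] else []) ++
  (if j ≠ g then [indice + 1] else []) ++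
  (if i ≠ g then [indice + g] else [])

-- ===== PRECONDITION & SPEC =====
def Spec_SpeakerNeighbour (indice : Int) (out : List Int) : Prop := out = SpeakerNeighbour_alt indice
instance (indice : Int) (out : List Int) : Decidable (Spec_SpeakerNeighbour indice out) := by unfold Spec_SpeakerNeighbour; infer_instance

-- ===== CLAIM (what is proved, stated in full; the proofs are below) =====
def Claim_equal_SpeakerNeighbour : Prop := ∀ (indice : Int), Dom_SpeakerNeighbour indice → Spec_SpeakerNeighbour indice (SpeakerNeighbour indice)

-- ===== LEMMAS AND PROOFS =====

-- j = x % 30 + 1 lies in [1, 30]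
theorem pymod30_eq (x : Int) : PySem.Int.mod x 30 = x % 30 := by
  simp [PySem.Int.mod, Int.fmod_eq_emod]

theorem j_bounds (x : Int) : 1 ≤ PySem.Int.mod x 30 + 1 ∧ PySem.Int.mod x 30 + 1 ≤ 30 := by
  rw [pymod30_eq]; omega

-- ===== VERDICT (by name: the statement is the Claim_ definition above) =====
theorem SpeakerNeighbour_spec : Claim_equal_SpeakerNeighbour := by
  intro indice _
  unfold Spec_SpeakerNeighbour SpeakerNeighbour SpeakerNeighbour_alt Indice2Pos
  have hj := j_bounds indice
  set i := PySem.Int.floordiv indice 30 + 1 with hi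
  set j := PySem.Int.mod indice 30 + 1 with hjdef
  by_cases hi1 : i = 1 <;> by_cases hig : i = 30 <;>
    by_cases hj1 : j = 1 <;> by_cases hjg : j = 30 <;>
    first
      | omega
      | simp [hi1, hig, hj1, hjg]
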